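-- pv_equiv track=rewrite | github.com/kingash2909/GFG-DSA-Python | String ADV/Maximum Occuring Character.py | getMaxOccurringChar
-- ===== SOURCE A (Python) =====
-- def getMaxOccurringChar(s):
--     #code here
--     char_freq = {}
--
--     # Iterate through the string to count the frequency of each character.
--     for char in s:
--         char_freq[char] = char_freq.get(char, 0) + 1
--
--     # Initialize variables to store the maximum frequency and character.
--     max_freq = float('-inf')
--     max_char = ''
--
--     # Iterate through the dictionary to find the character with the maximum frequency.
--     for char, freq in char_freq.items():
--         if freq > max_freq or (freq == max_freq and char < max_char):
--             max_freq = freq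
--             max_char = char
--
--     # Return the character with the maximum frequency.
--     return max_char
-- ===== SOURCE B (Python) =====
-- def getMaxOccurringChar(s):
--     # Sort the characters; equal characters become contiguous runs, so a single
--     # left-to-right scan over runs finds the longest run, and because runs appear
--     # in increasing character order, keeping only strictly longer runs yields the
--     # lexicographically smallest character among those with maximum frequency.
--     t = sorted(s)
--     best, best_len = '', 0
--     i, n = 0, len(t)
--     while i < n:
--         j = i
--         while j < n and t[j] == t[i]:
--             j += 1
--         if j - i > best_len:
--             best, best_len = t[i], j - i
--         i = j
--     return best
-- ===== Notes on version B (the rewrite author's own statement) =====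
-- stated objective: alternative
-- what changed: Replaces A's frequency dict plus argmax-with-tie-break loop over dict items by sorting the characters and scanning the contiguous runs once, keeping the first strictly longest run (runs appear in increasing character order, so this realises the lexicographic tie-break).
import Mathlib
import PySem

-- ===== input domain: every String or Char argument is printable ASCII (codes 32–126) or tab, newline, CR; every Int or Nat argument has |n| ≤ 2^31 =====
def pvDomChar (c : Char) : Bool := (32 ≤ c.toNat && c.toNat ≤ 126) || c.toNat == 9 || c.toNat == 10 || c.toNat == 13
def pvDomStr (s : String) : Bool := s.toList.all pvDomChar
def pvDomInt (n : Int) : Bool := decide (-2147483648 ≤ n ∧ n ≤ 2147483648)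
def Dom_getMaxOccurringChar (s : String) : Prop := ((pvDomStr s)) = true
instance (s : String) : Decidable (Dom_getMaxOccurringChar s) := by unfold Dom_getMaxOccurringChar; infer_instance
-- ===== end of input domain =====

-- B sorts the characters and scans the contiguous runs once, keeping the first strictly
-- longest run, instead of A's frequency dict + argmax-with-tie-break loop; objective:
-- alternative (sort-based, O(n log n) vs A's O(n)). Both are total.

-- ===== PORT A =====
-- A's sentinel pair (max_freq = float('-inf'), max_char = '') is ported as the Option state
-- `none`: any real frequency satisfies `freq > -inf`, so the sentinel pair is replaced on the
-- first dict item and the comparison `char < max_char` only ever compares single characters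
-- (Char `<` is code-point order, exactly Python's comparison of 1-char strings).
def getMaxOccurringChar (s : String) : String :=
  let char_freq : PySem.Dict Char Int :=
    s.toList.foldl (fun d c => d.insert c (d.getD c 0 + 1)) PySem.Dict.empty
  let r : Option (Int × Char) :=
    char_freq.items.foldl
      (fun acc cf =>
        match acc with
        | none => some (cf.2, cf.1)
        | some (m, mc) =>
          if cf.2 > m ∨ (cf.2 = m ∧ cf.1 < mc) then some (cf.2, cf.1) else acc)
      none
  match r with
  | none => ""
  | some (_, c) => c.toString

-- ===== PORT B =====
-- Source B's outer while loop over runs of the sorted list: at position i the inner while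
-- advances j over the characters equal to t[i]; that run is rest.takeWhile (== c) and the
-- loop resumes at i = j, i.e. on rest.dropWhile (== c). State (best, best_len) as in Source B.
def scanRuns (t : List Char) (best : String) (bestLen : Int) : String :=
  match t with
  | [] => best
  | c :: rest =>
    let run := rest.takeWhile (fun x => x == c)
    let tail := rest.dropWhile (fun x => x == c)
    let len : Int := (run.length : Int) + 1
    if len > bestLen then scanRuns tail c.toString len
    else scanRuns tail best bestLen
termination_by t.length
decreasing_by
  all_goals
    exact Nat.lt_succ_of_le (List.Sublist.length_le (List.dropWhile_sublist _))

def getMaxOccurringChar_alt (s : String) : String :=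
  scanRuns (PySem.List.sorted s.toList (fun c => c) false) "" 0

-- ===== PRECONDITION & SPEC =====
def Spec_getMaxOccurringChar (s : String) (out : String) : Prop := out = getMaxOccurringChar_alt s
instance (s : String) (out : String) : Decidable (Spec_getMaxOccurringChar s out) := by unfold Spec_getMaxOccurringChar; infer_instance

-- ===== CLAIM (what is proved, stated in full; the proofs are below) =====
def Claim_equal_getMaxOccurringChar : Prop := ∀ (s : String), Dom_getMaxOccurringChar s → Spec_getMaxOccurringChar s (getMaxOccurringChar s)

-- ===== LEMMAS AND PROOFS =====

-- Both programs select the pair (freq, char) minimising the lexicographic key (-freq, char).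
def pkey (p : Int × Char) : Int ×ₗ Char := toLex (-p.1, p.2)

-- the common binary selection step: keep the better of two (freq, char) pairs
def pmin (a b : Int × Char) : Int × Char :=
  if b.1 > a.1 ∨ (b.1 = a.1 ∧ b.2 < a.2) then b else a

-- the (length, char) pairs of the runs of t, in order (Source B's iteration)
def runPairs (t : List Char) : List (Int × Char) :=
  match t with
  | [] => []
  | c :: rest =>
    ((rest.takeWhile (fun x => x == c)).length + 1, c)
      :: runPairs (rest.dropWhile (fun x => x == c))
termination_by t.length
decreasing_by
  all_goals
    exact Nat.lt_succ_of_le (List.Sublist.length_le (List.dropWhile_sublist _))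

lemma pkey_inj {a b : Int × Char} (h : pkey a = pkey b) : a = b := by
  unfold pkey at h
  have h' : (-a.1, a.2) = (-b.1, b.2) := congrArg ofLex h
  obtain ⟨a1, a2⟩ := a; obtain ⟨b1, b2⟩ := b
  simp only [Prod.mk.injEq] at h' ⊢
  exact ⟨by omega, h'.2⟩

lemma pkey_lt {a b : Int × Char} :
    pkey b < pkey a ↔ (b.1 > a.1 ∨ (b.1 = a.1 ∧ b.2 < a.2)) := by
  unfold pkey
  rw [Prod.Lex.lt_iff]
  simp only [ofLex_toLex]
  constructor
  · rintro (h | ⟨h1, h2⟩)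
    · exact Or.inl (by omega)
    · exact Or.inr ⟨by omega, h2⟩
  · rintro (h | ⟨h1, h2⟩)
    · exact Or.inl (by omega)
    · exact Or.inr ⟨by omega, h2⟩

lemma pkey_pmin (a b : Int × Char) : pkey (pmin a b) = min (pkey a) (pkey b) := by
  unfold pmin
  rcases Decidable.em (b.1 > a.1 ∨ (b.1 = a.1 ∧ b.2 < a.2)) with h | h
  · rw [if_pos h, min_def, if_neg (not_le.2 (pkey_lt.2 h))]
  · rw [if_neg h, min_def, if_pos (not_lt.1 (fun hlt => h (pkey_lt.1 hlt)))]

-- A's selection loop, once the Option sentinel is replaced, is a pmin fold.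
lemma foldA_some (l : List (Char × Int)) (p : Int × Char) :
    l.foldl
      (fun acc cf =>
        match acc with
        | none => some (cf.2, cf.1)
        | some (m, mc) =>
          if cf.2 > m ∨ (cf.2 = m ∧ cf.1 < mc) then some (cf.2, cf.1) else acc)
      (some p)
    = some (l.foldl (fun q cf => pmin q (cf.2, cf.1)) p) := by
  induction l generalizing p with
  | nil => rfl
  | cons x xs ih =>
    obtain ⟨m, mc⟩ := p
    simp only [List.foldl_cons]
    rw [← ih]
    congr 1
    unfold pmin
    by_cases h : x.2 > m ∨ (x.2 = m ∧ x.1 < mc)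
    · simp [h]
    · simp [h]

-- the image of a pmin fold under pkey is a min fold
lemma pkey_foldl {α : Type} (l : List α) (g : α → Int × Char) (p : Int × Char) :
    pkey (l.foldl (fun q x => pmin q (g x)) p)
      = (l.map (fun x => pkey (g x))).foldl min (pkey p) := by
  induction l generalizing p with
  | nil => rfl
  | cons x xs ih =>
    simp only [List.foldl_cons, List.map_cons]
    rw [ih, pkey_pmin]

-- min? of a list over a linear order is invariant under permutation
lemma min?_perm {α : Type} [LinearOrder α] (l1 l2 : List α) (h : l1.Perm l2) :
    l1.min? = l2.min? := by
  cases h1 : l1.min? with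
  | none =>
    rw [List.min?_eq_none_iff] at h1
    subst h1
    rw [h.symm.eq_nil]
    rfl
  | some a =>
    cases h2 : l2.min? with
    | none =>
      rw [List.min?_eq_none_iff] at h2; subst h2
      simp [List.Perm.eq_nil h] at h1
    | some b =>
      rw [List.min?_eq_some_iff] at h1 h2
      exact congrArg some
        (le_antisymm (h1.2 b (h.mem_iff.2 h2.1)) (h2.2 a (h.mem_iff.1 h1.1)))

-- in a sorted list c :: rest, everything after the leading run of c is > c
lemma dropWhile_gt {c : Char} {rest : List Char}
    (hs : (c :: rest).Pairwise (· ≤ ·)) :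
    ∀ x ∈ rest.dropWhile (fun x => x == c), c < x := by
  obtain ⟨hle, hrest⟩ := List.pairwise_cons.1 hs
  intro x hx
  cases hd : rest.dropWhile (fun x => x == c) with
  | nil => rw [hd] at hx; exact absurd hx (List.not_mem_nil)
  | cons h ts =>
    have hne : rest.dropWhile (fun x => x == c) ≠ [] := by rw [hd]; exact List.cons_ne_nil _ _
    have hph := List.head_dropWhile_not (fun x => x == c) hne
    have hh : (rest.dropWhile (fun x => x == c)).head hne = h := by simp [hd]
    rw [hh] at hph
    simp only [beq_eq_false_iff_ne, ne_eq] at hph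
    have hhm : h ∈ rest := (List.dropWhile_sublist _).mem (hd ▸ List.mem_cons_self ..)
    have hch : c < h := lt_of_le_of_ne (hle h hhm) (Ne.symm hph)
    rw [hd] at hx
    rcases List.mem_cons.1 hx with rfl | hxts
    · exact hch
    · have hpw : (h :: ts).Pairwise (fun a b => a ≤ b) := by
        rw [← hd]; exact hrest.sublist (List.dropWhile_sublist _)
      exact lt_of_lt_of_le hch ((List.pairwise_cons.1 hpw).1 x hxts)

-- sortedness survives dropping the leading run
lemma dropWhile_pairwise {c : Char} {rest : List Char}
    (hs : (c :: rest).Pairwise (· ≤ ·)) :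
    (rest.dropWhile (fun x => x == c)).Pairwise (· ≤ ·) := by
  exact ((List.pairwise_cons.1 hs).2).sublist (List.dropWhile_sublist _)

-- count of the head over a sorted list is the length of its leading run
lemma count_head {c : Char} {rest : List Char}
    (hs : (c :: rest).Pairwise (· ≤ ·)) :
    (c :: rest).count c = (rest.takeWhile (fun x => x == c)).length + 1 := by
  have hsplit : rest = rest.takeWhile (fun x => x == c) ++ rest.dropWhile (fun x => x == c) :=
    (List.takeWhile_append_dropWhile).symm
  have h1 : (rest.takeWhile (fun x => x == c)).count c
      = (rest.takeWhile (fun x => x == c)).length := by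
    apply List.count_eq_length.2
    intro y hy
    have hyc := List.mem_takeWhile_imp hy
    exact (eq_of_beq hyc).symm
  have h2 : (rest.dropWhile (fun x => x == c)).count c = 0 := by
    apply List.count_eq_zero.2
    intro hc
    exact lt_irrefl c (dropWhile_gt hs c hc)
  calc (c :: rest).count c = rest.count c + 1 := List.count_cons_self ..
    _ = (rest.takeWhile (fun x => x == c)).length + 1 := by
      conv_lhs => rw [hsplit]
      rw [List.count_append, h1, h2]

-- counts of the later characters do not change when the leading run is dropped
lemma count_tail {c x : Char} {rest : List Char} (hx : x ≠ c) :
    (c :: rest).count x = (rest.dropWhile (fun x => x == c)).count x := by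
  have hsplit : rest = rest.takeWhile (fun x => x == c) ++ rest.dropWhile (fun x => x == c) :=
    (List.takeWhile_append_dropWhile).symm
  have h1 : (rest.takeWhile (fun x => x == c)).count x = 0 := by
    apply List.count_eq_zero.2
    intro hc
    have hxc := List.mem_takeWhile_imp hc
    exact hx (eq_of_beq hxc)
  conv_lhs => rw [hsplit]
  rw [List.count_cons, List.count_append, h1]
  simp [Ne.symm hx]

-- the run pairs of a sorted list are exactly (count, char) over its distinct characters
lemma runPairs_facts :
    ∀ (n : Nat) (t : List Char), t.length ≤ n → t.Pairwise (· ≤ ·) →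
      (∀ p ∈ runPairs t, p.1 = (t.count p.2 : Int) ∧ p.2 ∈ t) ∧
      ((runPairs t).map Prod.snd).Nodup ∧
      (∀ x, x ∈ (runPairs t).map Prod.snd ↔ x ∈ t) := by
  intro n
  induction n with
  | zero =>
    intro t hlen _
    rw [List.length_eq_zero_iff.1 (Nat.le_zero.1 hlen)]
    refine ⟨by intro p hp; simp [runPairs] at hp, by simp [runPairs], by simp [runPairs]⟩
  | succ n ih =>
    intro t hlen hs
    cases t with
    | nil =>
      refine ⟨by intro p hp; simp [runPairs] at hp, by simp [runPairs], by simp [runPairs]⟩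
    | cons c rest =>
      have htail : (rest.dropWhile (fun x => x == c)).length ≤ n := by
        have h1 := List.length_dropWhile_le (fun x => x == c) rest
        simp only [List.length_cons] at hlen
        omega
      obtain ⟨ih1, ih2, ih3⟩ := ih _ htail (dropWhile_pairwise hs)
      have hgt := dropWhile_gt hs
      have hrsplit : rest = rest.takeWhile (fun x => x == c) ++ rest.dropWhile (fun x => x == c) :=
        (List.takeWhile_append_dropWhile).symm
      rw [runPairs]
      refine ⟨?_, ?_, ?_⟩
      · intro p hp
        rcases List.mem_cons.1 hp with rfl | hp'
        · refine ⟨?_, List.mem_cons_self ..⟩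
          rw [count_head hs]
          push_cast
          ring
        · obtain ⟨h1, h2⟩ := ih1 p hp'
          have hpc : p.2 ≠ c := fun he => lt_irrefl c (he ▸ hgt p.2 h2)
          refine ⟨by rw [count_tail hpc, h1], ?_⟩
          exact List.mem_cons_of_mem _ ((List.dropWhile_sublist _).mem h2)
      · rw [List.map_cons]
        refine List.nodup_cons.2 ⟨?_, ih2⟩
        intro hc
        exact lt_irrefl c (hgt c ((ih3 c).1 hc))
      · intro x
        rw [List.map_cons]
        constructor
        · intro hx
          rcases List.mem_cons.1 hx with rfl | hx'
          · exact List.mem_cons_self ..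
          · exact List.mem_cons_of_mem _ ((List.dropWhile_sublist _).mem ((ih3 x).1 hx'))
        · intro hx
          rcases List.mem_cons.1 hx with rfl | hx'
          · exact List.mem_cons_self ..
          · rw [hrsplit] at hx'
            rcases List.mem_append.1 hx' with hx2 | hx2
            · have := List.mem_takeWhile_imp hx2
              rw [eq_of_beq this]
              exact List.mem_cons_self ..
            · exact List.mem_cons_of_mem _ ((ih3 x).2 hx2)

-- Source B's scan, from a state (m, ml) with every remaining character above m,
-- is the pmin fold over the remaining run pairs
lemma scan_eq :
    ∀ (n : Nat) (t : List Char), t.length ≤ n → t.Pairwise (· ≤ ·) →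
      ∀ (m : Char) (ml : Int), (∀ x ∈ t, m < x) →
      scanRuns t m.toString ml = ((runPairs t).foldl pmin (ml, m)).2.toString := by
  intro n
  induction n with
  | zero =>
    intro t hlen _ m ml _
    rw [List.length_eq_zero_iff.1 (Nat.le_zero.1 hlen)]
    rw [scanRuns, runPairs]
    rfl
  | succ n ih =>
    intro t hlen hs m ml hm
    cases t with
    | nil => rw [scanRuns, runPairs]; rfl
    | cons c rest =>
      have htail : (rest.dropWhile (fun x => x == c)).length ≤ n := by
        have h1 := List.length_dropWhile_le (fun x => x == c) rest
        simp only [List.length_cons] at hlen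
        omega
      have hgt := dropWhile_gt hs
      have hps := dropWhile_pairwise hs
      have hmc : m < c := hm c (List.mem_cons_self ..)
      have hmtail : ∀ x ∈ rest.dropWhile (fun x => x == c), m < x := by
        intro x hx
        exact hm x (List.mem_cons_of_mem _ ((List.dropWhile_sublist _).mem hx))
      rw [scanRuns, runPairs]
      simp only [List.foldl_cons]
      by_cases hlt : ((rest.takeWhile (fun x => x == c)).length : Int) + 1 > ml
      · rw [if_pos hlt]
        have hpm : pmin (ml, m) (((rest.takeWhile (fun x => x == c)).length : Int) + 1, c)
            = (((rest.takeWhile (fun x => x == c)).length : Int) + 1, c) := by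
          unfold pmin
          rw [if_pos (Or.inl hlt)]
        rw [hpm]
        exact ih _ htail hps c _ hgt
      · rw [if_neg hlt]
        have hpm : pmin (ml, m) (((rest.takeWhile (fun x => x == c)).length : Int) + 1, c)
            = (ml, m) := by
          unfold pmin
          rw [if_neg]
          rintro (h | ⟨_, h2⟩)
          · exact hlt h
          · exact lt_asymm hmc h2
        rw [hpm]
        exact ih _ htail hps m ml hmtail

-- ===== VERDICT (by name: the statement is the Claim_ definition above) =====
theorem getMaxOccurringChar_spec : Claim_equal_getMaxOccurringChar := by
  unfold Claim_equal_getMaxOccurringChar Spec_getMaxOccurringChar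
  intro s _
  unfold getMaxOccurringChar getMaxOccurringChar_alt
  dsimp only
  rw [PySem.Dict.foldl_insert_getD_add_one_eq_counter, PySem.Dict.items_counter]
  by_cases hnil : s.toList = []
  · rw [hnil]
    rw [show PySem.List.sorted ([] : List Char) (fun c => c) false = [] from rfl, scanRuns]
    rfl
  · -- the sorted character list is nonempty
    obtain ⟨c, rest, hT⟩ :
        ∃ c rest, PySem.List.sorted s.toList (fun c => c) false = c :: rest := by
      refine List.exists_cons_of_ne_nil (fun h => hnil ?_)
      exact (PySem.List.sorted_eq_nil_iff _ _ _).1 h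
    have hpwT : (c :: rest).Pairwise (· ≤ ·) := by
      have h := PySem.List.sorted_pairwise (xs := s.toList) (key := fun c : Char => c)
      rw [hT] at h
      exact h
    have hpermT : (c :: rest).Perm s.toList := by
      have h := PySem.List.sorted_perm (xs := s.toList) (key := fun c : Char => c) (rev := false)
      rw [hT] at h
      exact h
    -- B's first run always replaces the empty initial state
    rw [hT, scanRuns]
    rw [if_pos (by positivity)]
    rw [scan_eq (rest.dropWhile (fun x => x == c)).length _ le_rfl
      (dropWhile_pairwise hpwT) c _ (dropWhile_gt hpwT)]
    -- A's distinct-character list is nonempty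
    obtain ⟨c0, cr, hC⟩ : ∃ c0 cr, PySem.Set.ofList s.toList = c0 :: cr := by
      refine List.exists_cons_of_ne_nil (fun h => ?_)
      obtain ⟨x, hx⟩ := List.exists_mem_of_ne_nil _ hnil
      exact List.not_mem_nil (h ▸ (PySem.Set.mem_ofList _ x).2 hx)
    rw [hC, List.map_cons, List.foldl_cons]
    show (match
        List.foldl _ (some ((s.toList.count c0 : Int), c0))
          (cr.map fun k => (k, (s.toList.count k : Int))) with
      | none => ""
      | some (_, c) => c.toString) = _
    rw [foldA_some]
    -- both results have the same pkey, hence are equal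
    have hcnt : ∀ k : Char, (c :: rest).count k = s.toList.count k :=
      fun k => hpermT.count_eq k
    have hRP : runPairs (c :: rest)
        = (((rest.takeWhile (fun x => x == c)).length : Int) + 1, c)
            :: runPairs (rest.dropWhile (fun x => x == c)) := by
      rw [runPairs]
    obtain ⟨f1, f2, f3⟩ := runPairs_facts (c :: rest).length (c :: rest) le_rfl hpwT
    set resA := (cr.map fun k => (k, (s.toList.count k : Int))).foldl
        (fun q cf => pmin q (cf.2, cf.1)) ((s.toList.count c0 : Int), c0) with hresA
    set resB := (runPairs (rest.dropWhile (fun x => x == c))).foldl pmin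
        (((rest.takeWhile (fun x => x == c)).length : Int) + 1, c) with hresB
    have hkA : some (pkey resA)
        = ((c0 :: cr).map (fun k => pkey ((s.toList.count k : Int), k))).min? := by
      rw [List.map_cons, List.min?_cons']
      refine congrArg some ?_
      rw [hresA, List.foldl_map]
      exact pkey_foldl cr (fun k => ((s.toList.count k : Int), k)) _
    have hkB : some (pkey resB) = ((runPairs (c :: rest)).map pkey).min? := by
      rw [hRP, List.map_cons, List.min?_cons']
      refine congrArg some ?_
      rw [hresB]
      exact pkey_foldl (runPairs (rest.dropWhile (fun x => x == c))) (fun p => p) _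
    have hmapB : (runPairs (c :: rest)).map pkey
        = ((runPairs (c :: rest)).map Prod.snd).map
            (fun k => pkey ((s.toList.count k : Int), k)) := by
      rw [List.map_map]
      apply List.map_congr_left
      intro p hp
      obtain ⟨hp1, _⟩ := f1 p hp
      have hpe : p = ((s.toList.count p.2 : Int), p.2) := by
        rw [← hcnt p.2]
        exact Prod.ext hp1 rfl
      exact congrArg pkey hpe
    have hperm2 : (((runPairs (c :: rest)).map Prod.snd).map
          (fun k => pkey ((s.toList.count k : Int), k))).Perm
        ((c0 :: cr).map (fun k => pkey ((s.toList.count k : Int), k))) := by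
      apply List.Perm.map
      rw [← hC]
      apply (List.perm_ext_iff_of_nodup f2 (PySem.Set.nodup_ofList _)).2
      intro x
      rw [f3 x, PySem.Set.mem_ofList]
      constructor
      · intro hx; exact hpermT.mem_iff.1 hx
      · intro hx; exact hpermT.mem_iff.2 hx
    have hAB : resA = resB := by
      apply pkey_inj
      have := min?_perm _ _ hperm2
      apply Option.some.inj
      rw [hkA, hkB, hmapB]
      exact this.symm
    rw [hAB]
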